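-- pv_equiv track=rewrite | github.com/wazionapps/nexo | src/scripts/deep-sleep/apply_findings.py | _match_projects
-- ===== SOURCE A (Python) =====
-- def _match_projects(text: str, alias_map: dict[str, set[str]]) -> set[str]:
--     haystack = str(text or "").strip().lower()
--     if not haystack:
--         return set()
--     matches: set[str] = set()
--     for canonical, aliases in alias_map.items():
--         for alias in sorted(aliases, key=len, reverse=True):
--             if alias and alias in haystack:
--                 matches.add(canonical)
--                 break
--     return matches
-- ===== SOURCE B (Python) =====
-- def _match_projects(text: str, alias_map: dict[str, set[str]]) -> set[str]:
--     haystack = str(text or "").strip().lower()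
--     if not haystack:
--         return set()
--     distinct = set().union(*alias_map.values())
--     hits = {a for a in distinct if a and a in haystack}
--     return {c for c, aliases in alias_map.items() if aliases & hits}
-- ===== Notes on version B (the rewrite author's own statement) =====
-- stated objective: alternative
-- what changed: B drops the per-canonical length sort and break loop: it collects the distinct aliases once, tests each distinct alias against the haystack exactly once to build a hit set, and then selects canonicals by set intersection with that hit set.
import Mathlib
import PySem

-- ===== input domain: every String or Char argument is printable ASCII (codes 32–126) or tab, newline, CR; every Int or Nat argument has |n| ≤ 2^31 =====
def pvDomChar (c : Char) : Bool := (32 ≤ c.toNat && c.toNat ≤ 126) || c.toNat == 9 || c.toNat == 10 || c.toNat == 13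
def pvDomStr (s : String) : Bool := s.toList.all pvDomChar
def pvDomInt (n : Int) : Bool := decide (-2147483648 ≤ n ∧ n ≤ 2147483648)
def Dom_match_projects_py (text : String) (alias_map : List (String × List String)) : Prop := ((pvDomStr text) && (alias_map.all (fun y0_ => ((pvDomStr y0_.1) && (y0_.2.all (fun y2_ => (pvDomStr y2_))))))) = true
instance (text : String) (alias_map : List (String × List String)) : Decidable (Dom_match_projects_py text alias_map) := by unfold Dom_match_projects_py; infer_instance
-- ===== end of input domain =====

-- B replaces A's per-canonical length-sorted break loop by one pass that tests each distinct alias once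
-- and selects canonicals by intersection with the resulting hit set (alternative algorithm, same values).


-- ===== PORT A =====
-- inner 'for alias in sorted(aliases, key=len, reverse=True): if alias and alias in haystack: matches.add(canonical); break'
def aAliasLoop (hay : String) (ms : PySem.Set String) (canonical : String) : List String → PySem.Set String
  | [] => ms
  | al :: rest =>
      if (!(al == "")) && PySem.Str.isIn al hay then PySem.Set.add ms canonical
      else aAliasLoop hay ms canonical rest

def match_projects_py (text : String) (alias_map : List (String × List String)) : List String :=
  let haystack := PySem.Str.lower (PySem.Str.strip text)
  if haystack == "" then []
  else
    alias_map.foldl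
      (fun ms p => aAliasLoop haystack ms p.1 (PySem.List.sorted p.2 PySem.Str.len true))
      PySem.Set.empty

-- ===== PORT B =====
def match_projects_py_alt (text : String) (alias_map : List (String × List String)) : List String :=
  let haystack := PySem.Str.lower (PySem.Str.strip text)
  if haystack == "" then []
  else
    let distinct := PySem.Set.ofList (alias_map.flatMap (fun p => p.2))
    let hits := distinct.filter (fun a => (!(a == "")) && PySem.Str.isIn a haystack)
    PySem.Set.ofList
      ((alias_map.filter (fun p => !(PySem.Set.inter p.2 hits).isEmpty)).map (fun p => p.1))

-- ===== PRECONDITION & SPEC =====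
def Spec_match_projects_py (text : String) (alias_map : List (String × List String)) (out : List String) : Prop := out = match_projects_py_alt text alias_map
instance (text : String) (alias_map : List (String × List String)) (out : List String) : Decidable (Spec_match_projects_py text alias_map out) := by unfold Spec_match_projects_py; infer_instance

-- ===== CLAIM (what is proved, stated in full; the proofs are below) =====
def Claim_equal_match_projects_py : Prop := ∀ (text : String) (alias_map : List (String × List String)), Dom_match_projects_py text alias_map → Spec_match_projects_py text alias_map (match_projects_py text alias_map)

-- ===== LEMMAS AND PROOFS =====

-- A's inner break loop adds the canonical iff some alias in the list passes the test
theorem aAliasLoop_eq (hay : String) (m : PySem.Set String) (c : String) (l : List String) :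
    aAliasLoop hay m c l =
      if l.any (fun a => (!(a == "")) && PySem.Str.isIn a hay) then PySem.Set.add m c else m := by
  induction l with
  | nil => simp [aAliasLoop]
  | cons x xs ih =>
      simp only [aAliasLoop, List.any_cons]
      rcases Bool.eq_false_or_eq_true ((!(x == "")) && PySem.Str.isIn x hay) with hx | hx <;>
        simp only [hx, Bool.false_or, Bool.true_or, if_true, if_false, ih, Bool.false_eq_true]

-- 'any' is invariant under A's length sort
theorem any_sorted (l : List String) (f : String → Bool) :
    (PySem.List.sorted l PySem.Str.len true).any f = l.any f := by
  have hp : (PySem.List.sorted l PySem.Str.len true).Perm l := PySem.List.sorted_perm l PySem.Str.len true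
  exact hp.any_eq

-- ===== VERDICT (by name: the statement is the Claim_ definition above) =====
theorem match_projects_py_spec : Claim_equal_match_projects_py := by
  intro text alias_map _
  unfold Spec_match_projects_py match_projects_py match_projects_py_alt
  by_cases hh : (PySem.Str.lower (PySem.Str.strip text) == "") = true
  · simp [hh]
  · simp only [if_neg hh]
    set hay := PySem.Str.lower (PySem.Str.strip text) with hhay
    set good : String → Bool := fun a => (!(a == "")) && PySem.Str.isIn a hay with hgood
    -- rewrite B's side into a fold over alias_map
    rw [PySem.Set.ofList_eq_foldl, List.foldl_map,
        ← PySem.List.foldl_if_eq_foldl_filter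
          (p := fun p : String × List String =>
            !(PySem.Set.inter p.2
                ((PySem.Set.ofList (alias_map.flatMap (fun p => p.2))).filter good)).isEmpty)
          (f := fun (m : PySem.Set String) (p : String × List String) => PySem.Set.add m p.1)]
    -- rewrite A's side: inner loop to an 'any' test
    simp only [aAliasLoop_eq, any_sorted]
    apply PySem.List.foldl_congr_mem
    intro acc p hp
    have hcond : (p.2.any good) =
        (!(PySem.Set.inter p.2
            ((PySem.Set.ofList (alias_map.flatMap (fun q => q.2))).filter good)).isEmpty) := by
      rw [Bool.eq_iff_iff]
      simp only [Bool.not_eq_eq_eq_not, Bool.not_true, List.isEmpty_eq_false_iff, ne_eq]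
      constructor
      · intro hA
        rcases List.any_eq_true.mp hA with ⟨a, ha, hga⟩
        intro hnil
        have hmem : a ∈ PySem.Set.inter p.2
            ((PySem.Set.ofList (alias_map.flatMap (fun q => q.2))).filter good) :=
          (PySem.Set.mem_inter _ _ _).mpr
            ⟨ha, List.mem_filter.mpr
              ⟨(PySem.Set.mem_ofList _ _).mpr (List.mem_flatMap.mpr ⟨p, hp, ha⟩), hga⟩⟩
        rw [hnil] at hmem
        exact absurd hmem List.not_mem_nil
      · intro hne
        rcases List.exists_mem_of_ne_nil _ hne with ⟨a, hmem⟩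
        obtain ⟨ha, hfil⟩ := (PySem.Set.mem_inter _ _ _).mp hmem
        exact List.any_eq_true.mpr ⟨a, ha, (List.mem_filter.mp hfil).2⟩
    rw [hcond]
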